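-- pv_equiv track=rewrite | github.com/anjanatiha/Baseline-Lexical-Tagger | Anjana_Tiha_NLP_Assignment_3.py | get_has_word_pos_freq
-- ===== SOURCE A (Python) =====
-- def to_lower(text):
--     return text.lower()
--
-- def get_has_word_pos_freq(text):
--     pos = ""
--     word_pos = {}
--     curr_pos_word_freq = {}
--     for line in text:
--         line = line.strip()
--         temp = line.split(" ")
--         for i in range(len(temp)):
--             if temp[i] == "\n":
--                 pos = ""
--                 continue
--             if i%2 == 0:
--                 pos = temp[i]
--             else:
--                 vocab = temp[i]
--                 vocab = to_lower(vocab)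
--                 if vocab in word_pos:
--                     curr_pos_word_freq = word_pos[vocab]
--                     if pos in curr_pos_word_freq:
--                         curr_pos_word_freq[pos] = curr_pos_word_freq[pos] + 1
--                     else:
--                         curr_pos_word_freq[pos] = 1
--                 else:
--                     curr_pos_word_freq[pos] = 1
--                     word_pos[vocab] = curr_pos_word_freq
--
--                 curr_pos_word_freq = {}
--     return word_pos
-- ===== SOURCE B (Python) =====
-- def get_has_word_pos_freq(text):
--     # pass 1: flatten the tagged text into (word, pos) events
--     events = []
--     pos = ""
--     for line in text:
--         for i, tok in enumerate(line.strip().split(" ")):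
--             if tok == "\n":
--                 pos = ""
--             elif i % 2 == 0:
--                 pos = tok
--             else:
--                 events.append((tok.lower(), pos))
--     # pass 2: flat co-occurrence counter keyed by the (word, pos) tuple
--     flat = {}
--     for key in events:
--         flat[key] = flat.get(key, 0) + 1
--     # pass 3: reshape the flat table (insertion = first-seen order) into the nested dict
--     result = {}
--     for (word, pos), cnt in flat.items():
--         result.setdefault(word, {})[pos] = cnt
--     return result
-- ===== Notes on version B (the rewrite author's own statement) =====
-- stated objective: alternative
-- what changed: A builds the nested word->pos->count dict by live nested updates interleaved into the parsing loop; B first flattens the tagged text into a (word, pos) event list, tallies a flat counter keyed by the (word, pos) tuple, and then reshapes that flat table in a separate insertion-order pass into the nested dict.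
import Mathlib
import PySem

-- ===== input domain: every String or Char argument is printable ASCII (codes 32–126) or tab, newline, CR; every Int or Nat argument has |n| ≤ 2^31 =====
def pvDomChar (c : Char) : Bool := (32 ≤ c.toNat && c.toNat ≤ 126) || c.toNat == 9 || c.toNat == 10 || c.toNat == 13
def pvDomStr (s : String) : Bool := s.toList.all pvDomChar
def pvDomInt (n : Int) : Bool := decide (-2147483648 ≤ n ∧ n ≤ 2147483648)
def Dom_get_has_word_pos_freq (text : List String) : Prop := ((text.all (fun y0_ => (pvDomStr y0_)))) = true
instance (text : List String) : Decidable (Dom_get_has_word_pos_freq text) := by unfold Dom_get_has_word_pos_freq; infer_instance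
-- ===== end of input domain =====

-- B replaces A's parsing loop with live nested-dict updates by three separate passes
-- (flat (word,pos) event list → flat counter → reshape into the nested dict); same return value, proved equal.

-- ===== PORT A =====
-- shared tokenization helper: line.split(" ") (sep is nonempty, so split? always returns some)
def pvSplitSpace (s : String) : List String := (PySem.Str.split? s " ").getD []

def to_lower (t : String) : String := PySem.Str.lower t

-- the odd-index branch of A's loop body (the nested-dict update, with Python's in-place
-- mutation of the inner dict rendered as an overwriting insert at the same key)
def pvAUpd (wp : PySem.Dict String (PySem.Dict String Int)) (vocab pos : String) :
    PySem.Dict String (PySem.Dict String Int) :=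
  match wp.get? vocab with
  | some curr =>
      match curr.get? pos with
      | some c => wp.insert vocab (curr.insert pos (c + 1))
      | none   => wp.insert vocab (curr.insert pos 1)
  | none => wp.insert vocab ((PySem.Dict.empty).insert pos 1)

def pvATok (st : String × PySem.Dict String (PySem.Dict String Int)) (it : Int × String) :
    String × PySem.Dict String (PySem.Dict String Int) :=
  if it.2 = "\n" then ("", st.2)
  else if PySem.Int.mod it.1 2 = 0 then (it.2, st.2)
  else (st.1, pvAUpd st.2 (to_lower it.2) st.1)

-- for i in range(len(temp)): … temp[i] …
def pvALine (st : String × PySem.Dict String (PySem.Dict String Int)) (line : String) :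
    String × PySem.Dict String (PySem.Dict String Int) :=
  let temp := pvSplitSpace (PySem.Str.strip line)
  (PySem.List.pyRange 0 (PySem.List.len temp)).foldl
    (fun s j => pvATok s (j, PySem.List.pyGetD temp j "")) st

def get_has_word_pos_freq (text : List String) : List (String × List (String × Int)) :=
  (text.foldl pvALine ("", PySem.Dict.empty)).2.items.map (fun p => (p.1, p.2.items))

-- ===== PORT B =====
def pvBTok (st : String × List (String × String)) (it : Int × String) :
    String × List (String × String) :=
  if it.2 = "\n" then ("", st.2)
  else if PySem.Int.mod it.1 2 = 0 then (it.2, st.2)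
  else (st.1, st.2 ++ [(PySem.Str.lower it.2, st.1)])

-- for i, tok in enumerate(line.strip().split(" "))
def pvBLine (st : String × List (String × String)) (line : String) :
    String × List (String × String) :=
  (PySem.List.enumerate (pvSplitSpace (PySem.Str.strip line))).foldl pvBTok st

def pvBEvents (text : List String) : List (String × String) :=
  (text.foldl pvBLine ("", [])).2

-- flat[key] = flat.get(key, 0) + 1
def pvBFlat (evs : List (String × String)) : PySem.Dict (String × String) Int :=
  evs.foldl (fun d k => d.insert k (d.getD k 0 + 1)) PySem.Dict.empty

-- result.setdefault(word, {})[pos] = cnt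
def pvBReshape (flat : PySem.Dict (String × String) Int) :
    PySem.Dict String (PySem.Dict String Int) :=
  flat.items.foldl
    (fun r q => r.insert q.1.1 ((r.getD q.1.1 PySem.Dict.empty).insert q.1.2 q.2))
    PySem.Dict.empty

def get_has_word_pos_freq_alt (text : List String) : List (String × List (String × Int)) :=
  (pvBReshape (pvBFlat (pvBEvents text))).items.map (fun p => (p.1, p.2.items))

-- ===== PRECONDITION & SPEC =====
def Spec_get_has_word_pos_freq (text : List String) (out : List (String × List (String × Int))) : Prop := out = get_has_word_pos_freq_alt text
instance (text : List String) (out : List (String × List (String × Int))) : Decidable (Spec_get_has_word_pos_freq text out) := by unfold Spec_get_has_word_pos_freq; infer_instance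

-- ===== CLAIM (what is proved, stated in full; the proofs are below) =====
def Claim_equal_get_has_word_pos_freq : Prop := ∀ (text : List String), Dom_get_has_word_pos_freq text → Spec_get_has_word_pos_freq text (get_has_word_pos_freq text)

-- ===== LEMMAS AND PROOFS =====

-- A's nested-dict loop, isolated over an explicit (word, pos) event list
def pvNFold (d : PySem.Dict String (PySem.Dict String Int)) (evs : List (String × String)) :
    PySem.Dict String (PySem.Dict String Int) :=
  evs.foldl (fun d e => pvAUpd d e.1 e.2) d

-- the canonical value of both loops: outer keys in first-occurrence order of the word,
-- inner keys in first-occurrence order of the (word, pos) pair, values = occurrence counts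
def pvInner (evs : List (String × String)) (w : String) : PySem.Dict String Int :=
  PySem.Dict.mk (((PySem.List.dedup evs).filter (fun e => e.1 == w)).map
    (fun e => (e.2, (List.count e evs : Int))))
def pvCanon (evs : List (String × String)) : PySem.Dict String (PySem.Dict String Int) :=
  PySem.Dict.mk ((PySem.List.dedup (evs.map (fun e => e.1))).map (fun w => (w, pvInner evs w)))

lemma pvALine_eq (st : String × PySem.Dict String (PySem.Dict String Int)) (line : String) :
    pvALine st line =
      (PySem.List.enumerate (pvSplitSpace (PySem.Str.strip line))).foldl pvATok st := by
  unfold pvALine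
  rw [PySem.List.enumerate_eq_map_pyRange _ "", List.foldl_map]

lemma pvBTok_acc (ets : List (Int × String)) (pos : String) (evs : List (String × String)) :
    ets.foldl pvBTok (pos, evs) =
      ((ets.foldl pvBTok (pos, [])).1, evs ++ (ets.foldl pvBTok (pos, [])).2) := by
  induction ets generalizing pos evs with
  | nil => simp
  | cons it ets ih =>
    simp only [List.foldl_cons]
    by_cases h1 : it.2 = "\n"
    · simp only [pvBTok, if_pos h1]; rw [ih "" evs]
    · by_cases h2 : PySem.Int.mod it.1 2 = 0
      · simp only [pvBTok, if_neg h1, if_pos h2]; rw [ih it.2 evs]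
      · simp only [pvBTok, if_neg h1, if_neg h2, List.nil_append]
        rw [ih pos (evs ++ [(PySem.Str.lower it.2, pos)]),
            ih pos ([(PySem.Str.lower it.2, pos)])]
        simp

lemma pvTok_agree (ets : List (Int × String)) (pos : String)
    (d : PySem.Dict String (PySem.Dict String Int)) :
    ets.foldl pvATok (pos, d) =
      ((ets.foldl pvBTok (pos, [])).1, pvNFold d (ets.foldl pvBTok (pos, [])).2) := by
  induction ets generalizing pos d with
  | nil => simp [pvNFold]
  | cons it ets ih =>
    simp only [List.foldl_cons]
    by_cases h1 : it.2 = "\n"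
    · simp only [pvATok, pvBTok, if_pos h1]
      exact ih "" d
    · by_cases h2 : PySem.Int.mod it.1 2 = 0
      · simp only [pvATok, pvBTok, if_neg h1, if_pos h2]
        exact ih it.2 d
      · simp only [pvATok, pvBTok, if_neg h1, if_neg h2]
        simp only [List.nil_append]
        rw [ih pos (pvAUpd d (to_lower it.2) pos),
            pvBTok_acc ets pos ([(PySem.Str.lower it.2, pos)])]
        simp [pvNFold, to_lower]

lemma pvBLine_acc (lines : List String) (pos : String) (evs : List (String × String)) :
    lines.foldl pvBLine (pos, evs) =
      ((lines.foldl pvBLine (pos, [])).1, evs ++ (lines.foldl pvBLine (pos, [])).2) := by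
  induction lines generalizing pos evs with
  | nil => simp
  | cons line lines ih =>
    simp only [List.foldl_cons]
    have h := pvBTok_acc (PySem.List.enumerate (pvSplitSpace (PySem.Str.strip line))) pos evs
    have h0 := pvBTok_acc (PySem.List.enumerate (pvSplitSpace (PySem.Str.strip line))) pos []
    simp only [pvBLine]
    rw [h]
    set r := (PySem.List.enumerate (pvSplitSpace (PySem.Str.strip line))).foldl pvBTok (pos, [])
    rw [show (r.1, evs ++ r.2) = (r.1, (evs ++ r.2)) from rfl]
    rw [ih r.1 (evs ++ r.2), ih r.1 r.2]
    simp

lemma pvLine_agree (lines : List String) (pos : String)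
    (d : PySem.Dict String (PySem.Dict String Int)) :
    lines.foldl pvALine (pos, d) =
      ((lines.foldl pvBLine (pos, [])).1, pvNFold d (lines.foldl pvBLine (pos, [])).2) := by
  induction lines generalizing pos d with
  | nil => simp [pvNFold]
  | cons line lines ih =>
    simp only [List.foldl_cons]
    rw [pvALine_eq]
    rw [pvTok_agree]
    set r := (PySem.List.enumerate (pvSplitSpace (PySem.Str.strip line))).foldl pvBTok (pos, []) with hr
    rw [ih r.1 (pvNFold d r.2)]
    have : pvBLine (pos, []) line = r := rfl
    rw [show (lines.foldl pvBLine (pvBLine (pos, []) line)) = lines.foldl pvBLine r by rw [this]]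
    rw [pvBLine_acc lines r.1 r.2]
    simp [pvNFold, List.foldl_append]

lemma pvAUpd_of_some_some (d : PySem.Dict String (PySem.Dict String Int)) (w p : String)
    (curr : PySem.Dict String Int) (c : Int)
    (h1 : d.get? w = some curr) (h2 : curr.get? p = some c) :
    pvAUpd d w p = d.insert w (curr.insert p (c + 1)) := by
  unfold pvAUpd
  rw [h1]
  show (match curr.get? p with
    | some c => d.insert w (curr.insert p (c + 1))
    | none => d.insert w (curr.insert p 1)) = _
  rw [h2]

lemma pvAUpd_of_some_none (d : PySem.Dict String (PySem.Dict String Int)) (w p : String)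
    (curr : PySem.Dict String Int)
    (h1 : d.get? w = some curr) (h2 : curr.get? p = none) :
    pvAUpd d w p = d.insert w (curr.insert p 1) := by
  unfold pvAUpd
  rw [h1]
  show (match curr.get? p with
    | some c => d.insert w (curr.insert p (c + 1))
    | none => d.insert w (curr.insert p 1)) = _
  rw [h2]

lemma pvAUpd_of_none (d : PySem.Dict String (PySem.Dict String Int)) (w p : String)
    (h1 : d.get? w = none) :
    pvAUpd d w p = d.insert w ((PySem.Dict.empty).insert p 1) := by
  unfold pvAUpd
  rw [h1]

lemma pvDedup_snoc {α : Type} [BEq α] [LawfulBEq α] (xs : List α) (x : α) :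
    PySem.List.dedup (xs ++ [x]) =
      if x ∈ xs then PySem.List.dedup xs else PySem.List.dedup xs ++ [x] := by
  rw [PySem.List.dedup_eq_ofList, PySem.Set.ofList_append_singleton]
  by_cases h : x ∈ xs
  · rw [if_pos h, PySem.Set.add_of_mem ((PySem.Set.mem_ofList xs x).mpr h),
        PySem.List.dedup_eq_ofList]
  · rw [if_neg h, PySem.Set.add_of_not_mem (fun hm => h ((PySem.Set.mem_ofList xs x).mp hm)),
        PySem.List.dedup_eq_ofList]

lemma pvMem_dedup {α : Type} [BEq α] [LawfulBEq α] (xs : List α) (y : α) :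
    y ∈ PySem.List.dedup xs ↔ y ∈ xs := PySem.List.mem_dedup xs y

lemma pvCount_snoc {α : Type} [BEq α] [LawfulBEq α] [DecidableEq α] (l : List α) (e e' : α) :
    List.count e' (l ++ [e]) = List.count e' l + if e = e' then 1 else 0 := by
  rw [List.count_append, List.count_singleton]
  simp

lemma pvFilter_snd_nodup (l : List (String × String)) (hl : l.Nodup) (w : String) :
    ((l.filter (fun e => e.1 == w)).map (fun e => e.2)).Nodup := by
  apply List.Nodup.map_on _ (hl.filter _)
  intro x hx y hy hxy
  have hx1 : x.1 = w := by simpa using (List.mem_filter.mp hx).2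
  have hy1 : y.1 = w := by simpa using (List.mem_filter.mp hy).2
  exact Prod.ext (hx1.trans hy1.symm) hxy

lemma pvCanon_keys (evs : List (String × String)) :
    (pvCanon evs).keys = PySem.List.dedup (evs.map (fun e => e.1)) := by
  show List.map _ (pvCanon evs).items = _
  unfold pvCanon
  simp only [List.map_map]
  exact (List.map_congr_left (f := _) (g := id) (fun a _ => rfl)).trans (List.map_id _)

lemma pvInner_keys (evs : List (String × String)) (w : String) :
    (pvInner evs w).keys =
      ((PySem.List.dedup evs).filter (fun e => e.1 == w)).map (fun e => e.2) := by
  show List.map _ (pvInner evs w).items = _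
  unfold pvInner
  simp only [List.map_map]
  rfl

lemma pvInner_nodup_keys (evs : List (String × String)) (w : String) :
    (pvInner evs w).keys.Nodup := by
  rw [pvInner_keys]
  exact pvFilter_snd_nodup _ (PySem.List.nodup_dedup _) w

lemma pvInner_mem_keys (evs : List (String × String)) (w p : String) :
    p ∈ (pvInner evs w).keys ↔ (w, p) ∈ evs := by
  rw [pvInner_keys]
  constructor
  · intro h
    obtain ⟨e, he, hep⟩ := List.mem_map.mp h
    have h1 : e.1 = w := by simpa using (List.mem_filter.mp he).2
    have h2 : e ∈ evs := (pvMem_dedup _ _).mp (List.mem_filter.mp he).1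
    have : e = (w, p) := Prod.ext h1 hep
    exact this ▸ h2
  · intro h
    exact List.mem_map.mpr ⟨(w, p), List.mem_filter.mpr
      ⟨(pvMem_dedup _ _).mpr h, by simp⟩, rfl⟩

lemma pvInner_get?_mem (evs : List (String × String)) (w p : String) (h : (w, p) ∈ evs) :
    (pvInner evs w).get? p = some (List.count (w, p) evs : Int) := by
  apply PySem.Dict.get?_of_mem_items _ _ (pvInner_nodup_keys evs w)
  show ((w, p).2, (List.count (w, p) evs : Int)) ∈ _
  exact List.mem_map.mpr ⟨(w, p), List.mem_filter.mpr ⟨(pvMem_dedup _ _).mpr h, by simp⟩, rfl⟩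

lemma pvInner_get?_not_mem (evs : List (String × String)) (w p : String) (h : (w, p) ∉ evs) :
    (pvInner evs w).get? p = none := by
  rw [PySem.Dict.get?_eq_none_iff_not_mem_keys, pvInner_mem_keys]
  exact h

lemma pvCanon_get?_of_mem (evs : List (String × String)) (w : String)
    (h : w ∈ PySem.List.dedup (evs.map (fun e => e.1))) :
    (pvCanon evs).get? w = some (pvInner evs w) := by
  apply PySem.Dict.get?_of_mem_items
  · exact List.mem_map.mpr ⟨w, h, rfl⟩
  · rw [pvCanon_keys]; exact PySem.List.nodup_dedup _

lemma pvCanon_get?_of_not_mem (evs : List (String × String)) (w : String)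
    (h : ¬ w ∈ evs.map (fun e => e.1)) :
    (pvCanon evs).get? w = none := by
  rw [PySem.Dict.get?_eq_none_iff_not_mem_keys, pvCanon_keys, pvMem_dedup]
  exact h

-- extending the event list with a pair of a DIFFERENT word does not change pvInner at w'
lemma pvInner_snoc_ne (evs : List (String × String)) (w p w' : String) (hne : w' ≠ w) :
    pvInner (evs ++ [(w, p)]) w' = pvInner evs w' := by
  unfold pvInner
  congr 1
  rw [pvDedup_snoc]
  by_cases he : (w, p) ∈ evs
  · rw [if_pos he]
    apply List.map_congr_left
    intro e hef
    have : e ≠ (w, p) := by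
      intro h; subst h
      exact hne (Eq.symm (by simpa using (List.mem_filter.mp hef).2))
    rw [pvCount_snoc, if_neg (Ne.symm this)]
    simp
  · rw [if_neg he, List.filter_append]
    have : List.filter (fun e => e.1 == w') [(w, p)] = [] := by simp [Ne.symm hne]
    rw [this, List.append_nil]
    apply List.map_congr_left
    intro e hef
    have : e ≠ (w, p) := by
      intro h; subst h
      exact hne (Eq.symm (by simpa using (List.mem_filter.mp hef).2))
    rw [pvCount_snoc, if_neg (Ne.symm this)]
    simp

lemma pvInner_snoc_self_mem (evs : List (String × String)) (w p : String)
    (he : (w, p) ∈ evs) :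
    pvInner (evs ++ [(w, p)]) w =
      (pvInner evs w).insert p ((List.count (w, p) evs : Int) + 1) := by
  apply PySem.Dict.ext
  have hc : (pvInner evs w).contains p = true := by
    rw [PySem.Dict.contains_eq_decide_mem_keys]
    simp [pvInner_mem_keys, he]
  rw [PySem.Dict.items_insert_of_contains _ _ hc]
  show (((PySem.List.dedup (evs ++ [(w, p)])).filter (fun e => e.1 == w)).map
      (fun e => (e.2, (List.count e (evs ++ [(w, p)]) : Int)))) = _
  rw [pvDedup_snoc, if_pos he]
  unfold pvInner
  simp only [PySem.Dict.items]
  rw [List.map_map]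
  apply List.map_congr_left
  intro e hef
  have h1 : e.1 = w := by simpa using (List.mem_filter.mp hef).2
  by_cases hep : e.2 = p
  · have : e = (w, p) := Prod.ext h1 hep
    subst this
    simp [pvCount_snoc]
  · have hne : e ≠ (w, p) := fun h => hep (by rw [h])
    rw [pvCount_snoc]
    simp [Ne.symm hne, hep]

lemma pvInner_snoc_self_not_mem (evs : List (String × String)) (w p : String)
    (he : (w, p) ∉ evs) :
    pvInner (evs ++ [(w, p)]) w = (pvInner evs w).insert p 1 := by
  apply PySem.Dict.ext
  have hc : (pvInner evs w).contains p = false := by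
    rw [PySem.Dict.contains_eq_decide_mem_keys]
    simp [pvInner_mem_keys, he]
  rw [PySem.Dict.items_insert_of_not_contains _ _ hc]
  show (((PySem.List.dedup (evs ++ [(w, p)])).filter (fun e => e.1 == w)).map
      (fun e => (e.2, (List.count e (evs ++ [(w, p)]) : Int)))) = _
  rw [pvDedup_snoc, if_neg he, List.filter_append, List.map_append]
  congr 1
  · apply List.map_congr_left
    intro e hef
    have h2 : e ∈ evs := (pvMem_dedup _ _).mp (List.mem_filter.mp hef).1
    have hne : e ≠ (w, p) := fun h => he (h ▸ h2)
    rw [pvCount_snoc]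
    simp [Ne.symm hne]
  · have hcz : List.count (w, p) evs = 0 := List.count_eq_zero.mpr he
    simp [hcz]

lemma pvCanon_step (evs : List (String × String)) (w p : String) :
    pvAUpd (pvCanon evs) w p = pvCanon (evs ++ [(w, p)]) := by
  by_cases hw : w ∈ evs.map (fun e => e.1)
  · have hwD : w ∈ PySem.List.dedup (evs.map (fun e => e.1)) := (pvMem_dedup _ _).mpr hw
    have hcont : (pvCanon evs).contains w = true := by
      rw [PySem.Dict.contains_eq_decide_mem_keys, pvCanon_keys]
      simpa using hwD
    have houter : ∀ nin : PySem.Dict String Int,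
        ((pvCanon evs).insert w nin).items =
          (PySem.List.dedup (evs.map (fun e => e.1))).map
            (fun w' => if w' = w then (w, nin) else (w', pvInner evs w')) := by
      intro nin
      rw [PySem.Dict.items_insert_of_contains _ _ hcont]
      show List.map _ (List.map _ _) = _
      rw [List.map_map]
      apply List.map_congr_left
      intro w' _
      by_cases hww : w' = w <;> simp [hww]
    have hkeys' : (evs ++ [(w, p)]).map (fun e => e.1) = evs.map (fun e => e.1) ++ [w] := by
      simp
    have hded' : PySem.List.dedup ((evs ++ [(w, p)]).map (fun e => e.1)) =
        PySem.List.dedup (evs.map (fun e => e.1)) := by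
      rw [hkeys', pvDedup_snoc, if_pos hw]
    have hrhs : (pvCanon (evs ++ [(w, p)])).items =
        (PySem.List.dedup (evs.map (fun e => e.1))).map
          (fun w' => (w', pvInner (evs ++ [(w, p)]) w')) := by
      unfold pvCanon
      rw [hded']
    by_cases he : (w, p) ∈ evs
    · rw [pvAUpd_of_some_some _ _ _ _ _ (pvCanon_get?_of_mem _ _ hwD) (pvInner_get?_mem _ _ _ he)]
      apply PySem.Dict.ext
      rw [houter, hrhs]
      apply List.map_congr_left
      intro w' _
      by_cases hww : w' = w
      · subst hww
        rw [if_pos rfl, pvInner_snoc_self_mem _ _ _ he]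
      · rw [if_neg hww, pvInner_snoc_ne _ _ _ _ hww]
    · rw [pvAUpd_of_some_none _ _ _ _ (pvCanon_get?_of_mem _ _ hwD) (pvInner_get?_not_mem _ _ _ he)]
      apply PySem.Dict.ext
      rw [houter, hrhs]
      apply List.map_congr_left
      intro w' _
      by_cases hww : w' = w
      · subst hww
        rw [if_pos rfl, pvInner_snoc_self_not_mem _ _ _ he]
      · rw [if_neg hww, pvInner_snoc_ne _ _ _ _ hww]
  · have he : (w, p) ∉ evs := fun h => hw (List.mem_map.mpr ⟨(w, p), h, rfl⟩)
    rw [pvAUpd_of_none _ _ _ (pvCanon_get?_of_not_mem _ _ hw)]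
    apply PySem.Dict.ext
    have hcont : (pvCanon evs).contains w = false := by
      rw [PySem.Dict.contains_eq_decide_mem_keys, pvCanon_keys]
      simp [hw]
    rw [PySem.Dict.items_insert_of_not_contains _ _ hcont]
    have hkeys' : (evs ++ [(w, p)]).map (fun e => e.1) = evs.map (fun e => e.1) ++ [w] := by
      simp
    have hded' : PySem.List.dedup ((evs ++ [(w, p)]).map (fun e => e.1)) =
        PySem.List.dedup (evs.map (fun e => e.1)) ++ [w] := by
      rw [hkeys', pvDedup_snoc, if_neg hw]
    show _ = (pvCanon (evs ++ [(w, p)])).items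
    unfold pvCanon
    rw [hded', List.map_append]
    congr 1
    · apply List.map_congr_left
      intro w' hw'
      have hne : w' ≠ w := by
        intro h; subst h
        exact hw ((pvMem_dedup _ _).mp hw')
      rw [pvInner_snoc_ne _ _ _ _ hne]
    · -- new word: its inner dict is {p: 1}
      have hfil : (PySem.List.dedup evs).filter (fun e => e.1 == w) = [] := by
        rw [List.filter_eq_nil_iff]
        intro e heD hb
        have hmem : e ∈ evs := (pvMem_dedup _ _).mp heD
        have h1 : e.1 = w := by simpa using hb
        exact hw (h1 ▸ List.mem_map.mpr ⟨e, hmem, rfl⟩)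
      have : pvInner (evs ++ [(w, p)]) w = PySem.Dict.mk [(p, 1)] := by
        unfold pvInner
        rw [pvDedup_snoc, if_neg he, List.filter_append, hfil]
        have hcz : List.count (w, p) evs = 0 := List.count_eq_zero.mpr he
        simp [hcz]
      simp only [List.map_cons, List.map_nil]
      rw [this]
      rfl

lemma pvNFold_canon (evs : List (String × String)) :
    pvNFold PySem.Dict.empty evs = pvCanon evs := by
  induction evs using List.reverseRecOn with
  | nil => rfl
  | append_singleton xs e ih =>
    unfold pvNFold
    rw [List.foldl_append]
    show pvAUpd (pvNFold PySem.Dict.empty xs) e.1 e.2 = _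
    rw [ih, pvCanon_step]

-- closed form of B's reshape pass on any flat table with distinct keys
def pvReshapeRHS (l : List ((String × String) × Int)) :
    PySem.Dict String (PySem.Dict String Int) :=
  PySem.Dict.mk ((PySem.List.dedup (l.map (fun q => q.1.1))).map (fun w =>
    (w, PySem.Dict.mk ((l.filter (fun q => q.1.1 == w)).map (fun q => (q.1.2, q.2))))))

lemma pvReshapeRHS_keys (l : List ((String × String) × Int)) :
    (pvReshapeRHS l).keys = PySem.List.dedup (l.map (fun q => q.1.1)) := by
  show List.map _ (pvReshapeRHS l).items = _
  unfold pvReshapeRHS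
  simp only [List.map_map]
  exact (List.map_congr_left (f := _) (g := id) (fun a _ => rfl)).trans (List.map_id _)

lemma pvReshapeRHS_get?_of_mem (l : List ((String × String) × Int)) (w : String)
    (h : w ∈ PySem.List.dedup (l.map (fun q => q.1.1))) :
    (pvReshapeRHS l).get? w =
      some (PySem.Dict.mk ((l.filter (fun q => q.1.1 == w)).map (fun q => (q.1.2, q.2)))) := by
  apply PySem.Dict.get?_of_mem_items
  · exact List.mem_map.mpr ⟨w, h, rfl⟩
  · rw [pvReshapeRHS_keys]; exact PySem.List.nodup_dedup _

lemma pvReshapeRHS_get?_of_not_mem (l : List ((String × String) × Int)) (w : String)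
    (h : ¬ w ∈ l.map (fun q => q.1.1)) :
    (pvReshapeRHS l).get? w = none := by
  rw [PySem.Dict.get?_eq_none_iff_not_mem_keys, pvReshapeRHS_keys, pvMem_dedup]
  exact h

lemma pvReshape_formula (l : List ((String × String) × Int))
    (h : (l.map (fun q => q.1)).Nodup) :
    l.foldl (fun r q => r.insert q.1.1 ((r.getD q.1.1 PySem.Dict.empty).insert q.1.2 q.2))
        PySem.Dict.empty = pvReshapeRHS l := by
  induction l using List.reverseRecOn with
  | nil => rfl
  | append_singleton xs x ih =>
    have hx : x.1 ∉ xs.map (fun q => q.1) := by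
      have := h
      rw [List.map_append, List.map_cons, List.map_nil] at this
      have := List.nodup_append.mp this
      intro hm
      exact this.2.2 x.1 hm x.1 (by simp) rfl
    have hnx : (xs.map (fun q => q.1)).Nodup := by
      rw [List.map_append] at h
      exact (List.nodup_append.mp h).1
    rw [List.foldl_append, List.foldl_cons, List.foldl_nil, ih hnx]
    -- one reshape step on a fresh (word, pos) key
    apply PySem.Dict.ext
    by_cases hw : x.1.1 ∈ xs.map (fun q => q.1.1)
    · -- word already present: overwrite in place, inner gains a fresh pos at the end
      have hwD : x.1.1 ∈ PySem.List.dedup (xs.map (fun q => q.1.1)) := (pvMem_dedup _ _).mpr hw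
      rw [PySem.Dict.getD_eq_get?_getD, pvReshapeRHS_get?_of_mem _ _ hwD]
      have hcont : (pvReshapeRHS xs).contains x.1.1 = true := by
        rw [PySem.Dict.contains_eq_decide_mem_keys, pvReshapeRHS_keys]
        simpa using hwD
      rw [PySem.Dict.items_insert_of_contains _ _ hcont]
      have hded : PySem.List.dedup ((xs ++ [x]).map (fun q => q.1.1)) =
          PySem.List.dedup (xs.map (fun q => q.1.1)) := by
        rw [List.map_append, List.map_cons, List.map_nil, pvDedup_snoc, if_pos hw]
      show List.map _ (List.map _ _) = (pvReshapeRHS (xs ++ [x])).items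
      unfold pvReshapeRHS
      rw [hded, List.map_map]
      apply List.map_congr_left
      intro w' hw'
      simp only [Function.comp_apply, Option.getD_some]
      by_cases hww : w' = x.1.1
      · rw [if_pos (by simpa using hww), hww]
        congr 1
        -- inner: filtered list gains x at the end, and x.1.2 is a fresh pos there
        have hfx : List.filter (fun q => q.1.1 == x.1.1) (xs ++ [x]) =
            List.filter (fun q => q.1.1 == x.1.1) xs ++ [x] := by
          rw [List.filter_append]
          simp
        have hpcont : (PySem.Dict.mk ((xs.filter (fun q => q.1.1 == x.1.1)).map
            (fun q => (q.1.2, q.2)))).contains x.1.2 = false := by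
          rw [PySem.Dict.contains_eq_decide_mem_keys]
          simp only [decide_eq_false_iff_not]
          intro hm
          have hm' : x.1.2 ∈ ((xs.filter (fun q => q.1.1 == x.1.1)).map
              (fun q => (q.1.2, q.2))).map (fun r => r.1) := hm
          rw [List.map_map] at hm'
          obtain ⟨q, hq, hq2⟩ := List.mem_map.mp hm' 
          have hq1 : q.1.1 = x.1.1 := by simpa using (List.mem_filter.mp hq).2
          have : q.1 = x.1 := Prod.ext hq1 hq2
          exact hx (this ▸ List.mem_map.mpr ⟨q, (List.mem_filter.mp hq).1, rfl⟩)
        apply PySem.Dict.ext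
        rw [PySem.Dict.items_insert_of_not_contains _ _ hpcont]
        show _ = List.map _ (List.filter _ (xs ++ [x]))
        rw [hfx, List.map_append]
        rfl
      · rw [if_neg (by simpa using hww)]
        congr 2
        rw [List.filter_append]
        have : List.filter (fun q => q.1.1 == w') [x] = [] := by
          simp only [List.filter_cons, List.filter_nil]
          rw [if_neg]
          simp only [beq_iff_eq]
          exact fun hh => hww (Eq.symm hh)
        rw [this, List.append_nil]
    · -- fresh word: appended at the end with a one-entry inner dict
      have hxm : ¬ x.1.1 ∈ xs.map (fun q => q.1.1) := hw
      rw [PySem.Dict.getD_eq_get?_getD, pvReshapeRHS_get?_of_not_mem _ _ hxm]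
      have hcont : (pvReshapeRHS xs).contains x.1.1 = false := by
        rw [PySem.Dict.contains_eq_decide_mem_keys, pvReshapeRHS_keys]
        simp only [decide_eq_false_iff_not, pvMem_dedup]
        exact hxm
      rw [PySem.Dict.items_insert_of_not_contains _ _ hcont]
      have hded : PySem.List.dedup ((xs ++ [x]).map (fun q => q.1.1)) =
          PySem.List.dedup (xs.map (fun q => q.1.1)) ++ [x.1.1] := by
        rw [List.map_append, List.map_cons, List.map_nil, pvDedup_snoc, if_neg hxm]
      show _ = (pvReshapeRHS (xs ++ [x])).items
      unfold pvReshapeRHS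
      rw [hded, List.map_append]
      congr 1
      · apply List.map_congr_left
        intro w' hw'
        have hne : w' ≠ x.1.1 := by
          intro hh; subst hh
          exact hxm ((pvMem_dedup _ _).mp hw')
        congr 2
        rw [List.filter_append]
        have : List.filter (fun q => q.1.1 == w') [x] = [] := by
          simp only [List.filter_cons, List.filter_nil]
          rw [if_neg]
          simp only [beq_iff_eq]
          exact fun hh => hne (Eq.symm hh)
        rw [this, List.append_nil]
      · simp only [List.map_cons, List.map_nil]
        have hfil : List.filter (fun q => q.1.1 == x.1.1) xs = [] := by
          rw [List.filter_eq_nil_iff]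
          intro q hq hb
          have : q.1.1 = x.1.1 := by simpa using hb
          exact hxm (this ▸ List.mem_map.mpr ⟨q, hq, rfl⟩)
        rw [List.filter_append, hfil]
        simp
        rfl

lemma pvDedup_map_dedup {α β : Type} [BEq α] [LawfulBEq α] [BEq β] [LawfulBEq β]
    (xs : List α) (f : α → β) :
    PySem.List.dedup ((PySem.List.dedup xs).map f) = PySem.List.dedup (xs.map f) := by
  induction xs using List.reverseRecOn with
  | nil => rfl
  | append_singleton ys y ih =>
    rw [pvDedup_snoc]
    by_cases h : y ∈ ys
    · rw [if_pos h, List.map_append, List.map_cons, List.map_nil, pvDedup_snoc,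
          if_pos (List.mem_map.mpr ⟨y, h, rfl⟩), ih]
    · rw [if_neg h, List.map_append, List.map_cons, List.map_nil, List.map_append,
          List.map_cons, List.map_nil, pvDedup_snoc, pvDedup_snoc]
      have hiff : f y ∈ (PySem.List.dedup ys).map f ↔ f y ∈ ys.map f := by
        constructor
        · intro hm
          obtain ⟨a, ha, hfa⟩ := List.mem_map.mp hm
          exact List.mem_map.mpr ⟨a, (pvMem_dedup _ _).mp ha, hfa⟩
        · intro hm
          obtain ⟨a, ha, hfa⟩ := List.mem_map.mp hm
          exact List.mem_map.mpr ⟨a, (pvMem_dedup _ _).mpr ha, hfa⟩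
      by_cases hf : f y ∈ ys.map f
      · rw [if_pos (hiff.mpr hf), if_pos hf, ih]
      · rw [if_neg (fun hm => hf (hiff.mp hm)), if_neg hf, ih]

lemma pvB_canon (evs : List (String × String)) :
    pvBReshape (pvBFlat evs) = pvCanon evs := by
  have hflat : pvBFlat evs = PySem.Dict.counter evs :=
    PySem.Dict.foldl_insert_getD_add_one_eq_counter evs
  unfold pvBReshape
  rw [hflat, PySem.Dict.items_counter]
  set l : List ((String × String) × Int) :=
    (PySem.Set.ofList evs).map (fun k => (k, (List.count k evs : Int))) with hl
  have hnd : (l.map (fun q => q.1)).Nodup := by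
    rw [hl, List.map_map]
    exact ((List.map_congr_left (f := _) (g := id) (fun a _ => rfl)).trans
      (List.map_id _)) ▸ PySem.Set.nodup_ofList evs
  rw [pvReshape_formula l hnd]
  unfold pvReshapeRHS pvCanon
  congr 1
  have houter : l.map (fun q => q.1.1) = (PySem.List.dedup evs).map (fun e => e.1) := by
    rw [hl, List.map_map, PySem.List.dedup_eq_ofList]
    rfl
  rw [houter, pvDedup_map_dedup]
  apply List.map_congr_left
  intro w _
  congr 1
  unfold pvInner
  congr 1
  rw [hl, List.filter_map, List.map_map, PySem.List.dedup_eq_ofList]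
  rfl

-- ===== VERDICT (by name: the statement is the Claim_ definition above) =====
theorem get_has_word_pos_freq_spec : Claim_equal_get_has_word_pos_freq := by
  intro text _
  show _ = _
  unfold get_has_word_pos_freq get_has_word_pos_freq_alt
  rw [pvB_canon, pvLine_agree, ← pvBEvents, pvNFold_canon]
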